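-- pv_equiv track=rewrite | github.com/JVRC03/LeetCode | 2548-destroy-sequential-targets/2548-destroy-sequential-targets.py | destroyTargets
-- ===== SOURCE A (Python) =====
-- from typing import List
--
-- def destroyTargets(nums: List[int], k: int) -> int:
--     jvrc, curr = float('inf'), 0
--     dic = {}
--
--     for i in range(len(nums)):
--         temp = nums[i]%k
--         if temp not in dic:
--             dic[temp] = [1, nums[i]]
--         else:
--             dic[temp][0] += 1
--             dic[temp][1] = min(dic[temp][1], nums[i])
--
--     for i in dic:
--         if dic[i][0] > curr:
--             curr = dic[i][0]
--             jvrc = dic[i][1]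
--         elif dic[i][0] == curr:
--             jvrc = min(jvrc, dic[i][1])
--
--     return jvrc
-- ===== SOURCE B (Python) =====
-- from typing import List
--
-- def destroyTargets(nums: List[int], k: int) -> int:
--     best_len = best_val = run_len = run_start = 0
--     prev = None
--     for n in sorted(nums, key=lambda x: (x % k, x)):
--         r = n % k
--         if r != prev:
--             run_len, run_start, prev = 0, n, r
--         run_len += 1
--         if run_len > best_len or (run_len == best_len and run_start < best_val):
--             best_len, best_val = run_len, run_start
--     return best_val
-- ===== Notes on version B (the rewrite author's own statement) =====
-- stated objective: alternative
-- what changed: Drops the per-remainder dict of [count,min] and the dict scan entirely: B sorts nums by (n % k, n) and scans maximal runs of equal remainder once, tracking the longest run and its first element (the group minimum, since runs are value-sorted).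
-- outside the precondition, e.g. on destroyTargets([], 5): A returns inf, B returns 0; on destroyTargets([3, 7], 0): A raises ZeroDivisionError, B raises ZeroDivisionError
import Mathlib
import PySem

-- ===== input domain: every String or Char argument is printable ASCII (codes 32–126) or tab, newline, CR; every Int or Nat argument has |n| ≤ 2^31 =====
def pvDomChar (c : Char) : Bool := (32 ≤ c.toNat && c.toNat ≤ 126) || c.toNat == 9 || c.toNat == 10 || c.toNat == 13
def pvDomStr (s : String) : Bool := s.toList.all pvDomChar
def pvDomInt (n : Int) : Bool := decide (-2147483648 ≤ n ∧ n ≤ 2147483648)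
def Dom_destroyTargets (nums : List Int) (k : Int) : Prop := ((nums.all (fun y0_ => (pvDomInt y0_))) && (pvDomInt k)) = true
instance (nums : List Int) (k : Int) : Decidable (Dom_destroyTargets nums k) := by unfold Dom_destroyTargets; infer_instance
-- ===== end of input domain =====

-- B drops A's per-remainder dict of [count, min] and its dict scan: it sorts nums by (n % k, n)
-- and scans maximal runs of equal remainder once (alternative algorithm, O(n log n) vs A's O(n)).

-- ===== PORT A =====
-- Python's jvrc starts as float('inf'); under Pre_ (nums ≠ []) it is overwritten before it is ever
-- read (every count is ≥ 1 > curr = 0), so it is ported as the unread placeholder 0.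
def destroyTargets (nums : List Int) (k : Int) : Int :=
  let dic := nums.foldl (fun d n =>
    let temp := PySem.Int.mod n k
    match d.get? temp with
    | none => d.insert temp ((1 : Int), n)
    | some cm => d.insert temp (cm.1 + 1, min cm.2 n)) PySem.Dict.empty
  let res := dic.keys.foldl (fun (s : Int × Int) i =>
    let p := dic.getD i ((0 : Int), (0 : Int))
    if p.1 > s.1 then (p.1, p.2)
    else if p.1 == s.1 then (s.1, min s.2 p.2)
    else s) ((0 : Int), (0 : Int))
  res.2

-- ===== PORT B =====
-- Source B's loop state (best_len, best_val, run_len, run_start, prev); prev is None before the first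
-- iteration, hence Option Int; 'r != prev' is the Option equality test.
def destroyTargets_alt (nums : List Int) (k : Int) : Int :=
  ((PySem.List.sorted2 nums (fun x => PySem.Int.mod x k) (fun x => x)).foldl
    (fun (st : Int × Int × Int × Int × Option Int) n =>
      let r := PySem.Int.mod n k
      let (bl, bv, rl, rs, prev) := st
      let (rl, rs, prev) := if prev == some r then (rl, rs, prev) else ((0 : Int), n, some r)
      let rl := rl + 1
      if rl > bl ∨ (rl = bl ∧ rs < bv) then (rl, rs, rl, rs, prev) else (bl, bv, rl, rs, prev))
    (0, 0, 0, 0, none)).2.1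

-- ===== PRECONDITION & SPEC =====
-- Pre_ excludes nums = [] (A returns float('inf'), not an int; B returns 0 there)
-- and k = 0 (A's '%' raises ZeroDivisionError, as does B's sort key).
def Pre_destroyTargets (nums : List Int) (k : Int) : Prop := nums ≠ [] ∧ k ≠ 0
instance (nums : List Int) (k : Int) : Decidable (Pre_destroyTargets nums k) := by unfold Pre_destroyTargets; infer_instance
def pvWitness_destroyTargets : List Int × Int := ([1, 2, 3], 2)

def Spec_destroyTargets (nums : List Int) (k : Int) (out : Int) : Prop := out = destroyTargets_alt nums k
instance (nums : List Int) (k : Int) (out : Int) : Decidable (Spec_destroyTargets nums k out) := by unfold Spec_destroyTargets; infer_instance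

-- ===== CLAIM (what is proved, stated in full; the proofs are below) =====
def Claim_equal_destroyTargets : Prop := ∀ (nums : List Int) (k : Int), Dom_destroyTargets nums k → Pre_destroyTargets nums k → Spec_destroyTargets nums k (destroyTargets nums k)

-- ===== LEMMAS AND PROOFS =====

-- proof-side abbreviations
def pvG (k n : Int) : Int := PySem.Int.mod n k
def pvGrp (nums : List Int) (k r : Int) : List Int := nums.filter (fun n => pvG k n == r)
def pvMn (nums : List Int) (k r : Int) : Int :=
  match pvGrp nums k r with
  | [] => 0
  | h :: t => t.foldl min h
def pvCnt (nums : List Int) (k r : Int) : Int := ((pvGrp nums k r).length : Int)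

-- A's first loop, named so the proofs can speak about it
def pvBody (k : Int) (d : PySem.Dict Int (Int × Int)) (n : Int) : PySem.Dict Int (Int × Int) :=
  let temp := PySem.Int.mod n k
  match d.get? temp with
  | none => d.insert temp ((1 : Int), n)
  | some cm => d.insert temp (cm.1 + 1, min cm.2 n)

def pvDic (nums : List Int) (k : Int) : PySem.Dict Int (Int × Int) :=
  nums.foldl (pvBody k) PySem.Dict.empty

-- A's second loop, abstracted over the pair list it scans
def pvStep (s p : Int × Int) : Int × Int :=
  if p.1 > s.1 then (p.1, p.2) else if p.1 == s.1 then (s.1, min s.2 p.2) else s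

theorem pvA_eq (nums : List Int) (k : Int) :
    destroyTargets nums k =
      ((pvDic nums k).keys.foldl
        (fun (s : Int × Int) i => pvStep s ((pvDic nums k).getD i ((0 : Int), (0 : Int))))
        ((0 : Int), (0 : Int))).2 := rfl

theorem pvBody_eq (k : Int) (d : PySem.Dict Int (Int × Int)) (x : Int) :
    pvBody k d x =
      match d.get? (pvG k x) with
      | none => d.insert (pvG k x) ((1 : Int), x)
      | some cm => d.insert (pvG k x) (cm.1 + 1, min cm.2 x) := rfl

theorem pv_fst (L : List (Int × Int)) (s : Int × Int) :
    (L.foldl pvStep s).1 = L.foldl (fun a p => max a p.1) s.1 := by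
  induction L generalizing s with
  | nil => rfl
  | cons p t ih =>
    rw [List.foldl_cons, List.foldl_cons, ih]
    congr 1
    unfold pvStep
    split_ifs with h1 h2 <;> simp_all <;> omega

theorem pv_fst_ge (L : List (Int × Int)) (s : Int × Int) : s.1 ≤ (L.foldl pvStep s).1 := by
  rw [pv_fst]
  exact (PySem.List.le_foldl_max_int L Prod.fst s.1).1

theorem pv_snd_le (L : List (Int × Int)) (s : Int × Int)
    (h : (L.foldl pvStep s).1 = s.1) : (L.foldl pvStep s).2 ≤ s.2 := by
  induction L generalizing s with
  | nil => simp
  | cons p t ih =>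
    simp only [List.foldl_cons] at h ⊢
    have hge := pv_fst_ge t (pvStep s p)
    by_cases h1 : p.1 > s.1
    · simp only [pvStep, if_pos h1] at h hge ⊢; omega
    · by_cases h2 : p.1 = s.1
      · have hst : pvStep s p = (s.1, min s.2 p.2) := by
          simp [pvStep, h2]
        rw [hst] at h ⊢
        exact le_trans (ih _ h) (min_le_left _ _)
      · have hst : pvStep s p = s := by
          simp [pvStep, h1, h2]
        rw [hst] at h ⊢
        exact ih _ h

theorem pv_snd_eq (L : List (Int × Int)) (s : Int × Int)
    (h : (L.foldl pvStep s).1 = s.1) :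
    (L.foldl pvStep s).2 = s.2 ∨
      ∃ p ∈ L, p.1 = (L.foldl pvStep s).1 ∧ (L.foldl pvStep s).2 = p.2 := by
  induction L generalizing s with
  | nil => left; rfl
  | cons p t ih =>
    simp only [List.foldl_cons] at h ⊢
    have hge := pv_fst_ge t (pvStep s p)
    by_cases h1 : p.1 > s.1
    · simp only [pvStep, if_pos h1] at h hge; omega
    · by_cases h2 : p.1 = s.1
      · have hst : pvStep s p = (s.1, min s.2 p.2) := by simp [pvStep, h2]
        rw [hst] at h ⊢
        rcases ih _ h with he | ⟨q, hq, hq1, hq2⟩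
        · rcases min_choice s.2 p.2 with hm | hm
          · left; rw [he]; exact hm
          · right
            refine ⟨p, List.mem_cons_self .., by omega, by rw [he]; exact hm⟩
        · right; exact ⟨q, List.mem_cons_of_mem _ hq, hq1, hq2⟩
      · have hst : pvStep s p = s := by simp [pvStep, h1, h2]
        rw [hst] at h ⊢
        rcases ih _ h with he | ⟨q, hq, hq1, hq2⟩
        · left; exact he
        · right; exact ⟨q, List.mem_cons_of_mem _ hq, hq1, hq2⟩

theorem pv_attain (L : List (Int × Int)) (s : Int × Int)
    (h : s.1 < (L.foldl pvStep s).1) :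
    ∃ p ∈ L, p.1 = (L.foldl pvStep s).1 ∧ (L.foldl pvStep s).2 = p.2 := by
  induction L generalizing s with
  | nil => simp at h
  | cons p t ih =>
    simp only [List.foldl_cons] at h ⊢
    by_cases hlt : (pvStep s p).1 < (t.foldl pvStep (pvStep s p)).1
    · obtain ⟨q, hq, hq1, hq2⟩ := ih _ hlt
      exact ⟨q, List.mem_cons_of_mem _ hq, hq1, hq2⟩
    · have heq : (t.foldl pvStep (pvStep s p)).1 = (pvStep s p).1 := by
        have := pv_fst_ge t (pvStep s p); omega
      by_cases h1 : p.1 > s.1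
      · have hst : pvStep s p = (p.1, p.2) := by simp [pvStep, h1]
        rcases pv_snd_eq t (pvStep s p) heq with he | ⟨q, hq, hq1, hq2⟩
        · exact ⟨p, List.mem_cons_self .., by rw [heq, hst], by rw [he, hst]⟩
        · exact ⟨q, List.mem_cons_of_mem _ hq, hq1, hq2⟩
      · have hst : (pvStep s p).1 = s.1 := by
          by_cases h2 : p.1 = s.1 <;> simp [pvStep, h1, h2]
        rw [heq, hst] at h; omega

theorem pv_min (L : List (Int × Int)) (s : Int × Int) :
    ∀ p ∈ L, p.1 = (L.foldl pvStep s).1 → (L.foldl pvStep s).2 ≤ p.2 := by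
  induction L generalizing s with
  | nil => simp
  | cons q t ih =>
    intro p hp hp1
    simp only [List.foldl_cons] at hp1 ⊢
    rcases List.mem_cons.1 hp with rfl | hp
    · have hge := pv_fst_ge t (pvStep s p)
      by_cases h1 : p.1 > s.1
      · have hst : pvStep s p = (p.1, p.2) := by simp [pvStep, h1]
        rw [hst] at hp1 ⊢
        exact pv_snd_le t (p.1, p.2) (by simpa using hp1.symm)
      · by_cases h2 : p.1 = s.1
        · have hst : pvStep s p = (s.1, min s.2 p.2) := by simp [pvStep, h2]
          rw [hst] at hp1 ⊢
          have hle := pv_snd_le t (s.1, min s.2 p.2) (by simp at hp1 ⊢; omega)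
          exact le_trans hle (min_le_right _ _)
        · have hst : pvStep s p = s := by simp [pvStep, h1, h2]
          rw [hst] at hp1 hge; omega
    · exact ih (pvStep s q) p hp hp1

-- group-append facts
theorem pvGrp_append (t : List Int) (x k j : Int) :
    pvGrp (t ++ [x]) k j = pvGrp t k j ++ (if pvG k x = j then [x] else []) := by
  simp only [pvGrp, List.filter_append]
  congr 1
  by_cases h : pvG k x = j
  · have hb : (pvG k x == j) = true := by simpa using h
    rw [if_pos h]; simp [List.filter, hb]
  · have hb : (pvG k x == j) = false := by simpa using h
    rw [if_neg h]; simp [List.filter, hb]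

theorem pvGrp_append_ne (t : List Int) (x k j : Int) (h : pvG k x ≠ j) :
    pvGrp (t ++ [x]) k j = pvGrp t k j := by
  rw [pvGrp_append, if_neg h, List.append_nil]

theorem pvCnt_append_eq (t : List Int) (x k j : Int) (h : pvG k x = j) :
    pvCnt (t ++ [x]) k j = pvCnt t k j + 1 := by
  simp only [pvCnt, pvGrp_append, if_pos h, List.length_append]
  simp

theorem pvCnt_append_ne (t : List Int) (x k j : Int) (h : pvG k x ≠ j) :
    pvCnt (t ++ [x]) k j = pvCnt t k j := by
  simp [pvCnt, pvGrp_append_ne t x k j h]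

theorem pvMn_append_ne (t : List Int) (x k j : Int) (h : pvG k x ≠ j) :
    pvMn (t ++ [x]) k j = pvMn t k j := by
  simp [pvMn, pvGrp_append_ne t x k j h]

theorem pvMn_append_eq (t : List Int) (x k j : Int) (h : pvG k x = j)
    (hne : pvGrp t k j ≠ []) :
    pvMn (t ++ [x]) k j = min (pvMn t k j) x := by
  obtain ⟨a, u, hau⟩ : ∃ a u, pvGrp t k j = a :: u := by
    cases hg : pvGrp t k j with
    | nil => exact absurd hg hne
    | cons a b => exact ⟨a, b, rfl⟩
  have hgx : pvGrp (t ++ [x]) k j = a :: (u ++ [x]) := by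
    rw [pvGrp_append, hau, if_pos h]; rfl
  simp only [pvMn, hgx, hau, List.foldl_append, List.foldl_cons, List.foldl_nil]

theorem pvMn_append_fresh (t : List Int) (x k j : Int) (h : pvG k x = j)
    (hnil : pvGrp t k j = []) :
    pvMn (t ++ [x]) k j = x := by
  have hgx : pvGrp (t ++ [x]) k j = [x] := by
    rw [pvGrp_append, hnil, if_pos h]; rfl
  simp [pvMn, hgx]

-- A's first loop writes, for each remainder seen so far, (group size, group minimum)
theorem pvDic_get? (nums : List Int) (k r : Int) :
    (pvDic nums k).get? r =
      if pvGrp nums k r = [] then none else some (pvCnt nums k r, pvMn nums k r) := by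
  induction nums using List.reverseRecOn with
  | nil => simp [pvDic, pvGrp, pvCnt, pvMn, PySem.Dict.get?_empty]
  | append_singleton ns x ih =>
    have hstep : pvDic (ns ++ [x]) k = pvBody k (pvDic ns k) x := by
      simp [pvDic, List.foldl_append]
    rw [hstep, pvBody_eq]
    by_cases hr : r = pvG k x
    · subst hr
      rw [ih]
      by_cases hg : pvGrp ns k (pvG k x) = []
      · rw [if_pos hg]
        show ((pvDic ns k).insert (pvG k x) ((1 : Int), x)).get? (pvG k x) = _
        rw [PySem.Dict.get?_insert_self]
        have hgx : pvGrp (ns ++ [x]) k (pvG k x) = [x] := by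
          rw [pvGrp_append, hg, if_pos rfl]; rfl
        rw [if_neg (by simp [hgx])]
        simp [pvCnt, pvMn, hgx]
      · rw [if_neg hg]
        show ((pvDic ns k).insert (pvG k x)
            ((pvCnt ns k (pvG k x), pvMn ns k (pvG k x)).1 + 1,
              min (pvCnt ns k (pvG k x), pvMn ns k (pvG k x)).2 x)).get? (pvG k x) = _
        rw [PySem.Dict.get?_insert_self]
        have hgne : pvGrp (ns ++ [x]) k (pvG k x) ≠ [] := by
          rw [pvGrp_append, if_pos rfl]; simp
        rw [if_neg hgne]
        rw [pvCnt_append_eq ns x k _ rfl, pvMn_append_eq ns x k _ rfl hg]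
    · have hgr : pvGrp (ns ++ [x]) k r = pvGrp ns k r :=
        pvGrp_append_ne ns x k r (fun hh => hr hh.symm)
      have hcnt : pvCnt (ns ++ [x]) k r = pvCnt ns k r :=
        pvCnt_append_ne ns x k r (fun hh => hr hh.symm)
      have hmn : pvMn (ns ++ [x]) k r = pvMn ns k r :=
        pvMn_append_ne ns x k r (fun hh => hr hh.symm)
      rw [hgr, hcnt, hmn, ← ih]
      cases hget : (pvDic ns k).get? (pvG k x) with
      | none =>
        show ((pvDic ns k).insert (pvG k x) ((1 : Int), x)).get? r = (pvDic ns k).get? r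
        exact PySem.Dict.get?_insert_of_ne _ _ hr
      | some cm =>
        show ((pvDic ns k).insert (pvG k x) (cm.1 + 1, min cm.2 x)).get? r = (pvDic ns k).get? r
        exact PySem.Dict.get?_insert_of_ne _ _ hr

-- the keys of A's dict are the distinct remainders in first-occurrence order
theorem pvDic_keys (nums : List Int) (k : Int) :
    (pvDic nums k).keys = PySem.Set.ofList (nums.map (pvG k)) := by
  have hcong : pvDic nums k =
      nums.foldl (fun d n => d.insert (pvG k n)
        (match d.get? (pvG k n) with
         | none => ((1 : Int), n)
         | some cm => (cm.1 + 1, min cm.2 n))) PySem.Dict.empty := by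
    unfold pvDic
    apply PySem.List.foldl_congr_mem
    intro d n _
    rw [pvBody_eq]
    cases d.get? (pvG k n) <;> rfl
  rw [hcong, PySem.Dict.keys_foldl_insert_key]
  rw [PySem.Dict.keys_empty, PySem.Set.update_nil_left]

-- group membership facts
theorem pv_mem_grp {nums : List Int} {k r n : Int} (h : n ∈ pvGrp nums k r) :
    n ∈ nums ∧ pvG k n = r := by
  simp only [pvGrp, List.mem_filter, beq_iff_eq] at h
  exact h

theorem pv_grp_mem {nums : List Int} {k r n : Int} (h1 : n ∈ nums) (h2 : pvG k n = r) :
    n ∈ pvGrp nums k r := by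
  simp only [pvGrp, List.mem_filter, beq_iff_eq]
  exact ⟨h1, h2⟩

theorem pv_mn_mem {nums : List Int} {k r : Int} (h : pvGrp nums k r ≠ []) :
    pvMn nums k r ∈ pvGrp nums k r := by
  obtain ⟨a, t, hat⟩ : ∃ a t, pvGrp nums k r = a :: t := by
    cases hg : pvGrp nums k r with
    | nil => exact absurd hg h
    | cons a b => exact ⟨a, b, rfl⟩
  rw [hat]
  simp only [pvMn, hat]
  rcases PySem.List.foldl_min_mem t a with he | hm
  · rw [he]; exact List.mem_cons_self ..
  · exact List.mem_cons_of_mem _ hm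

theorem pv_mn_le {nums : List Int} {k r n : Int} (h : n ∈ pvGrp nums k r) :
    pvMn nums k r ≤ n := by
  obtain ⟨a, t, hat⟩ : ∃ a t, pvGrp nums k r = a :: t := by
    cases hg : pvGrp nums k r with
    | nil => rw [hg] at h; simp at h
    | cons a b => exact ⟨a, b, rfl⟩
  simp only [pvMn, hat]
  rw [hat] at h
  rcases List.mem_cons.1 h with rfl | h
  · exact (PySem.List.foldl_min_le t n).1
  · exact (PySem.List.foldl_min_le t a).2 n h

theorem pv_grp_ne_nil {nums : List Int} {k r : Int} (h : r ∈ nums.map (pvG k)) :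
    pvGrp nums k r ≠ [] := by
  obtain ⟨n, hn, hg⟩ := List.mem_map.1 h
  have : n ∈ pvGrp nums k r := pv_grp_mem hn hg
  intro he; rw [he] at this; simp at this

theorem pv_cnt_pos {nums : List Int} {k r : Int} (h : pvGrp nums k r ≠ []) :
    1 ≤ pvCnt nums k r := by
  have := List.length_pos_iff.2 h
  simp only [pvCnt]; omega

-- ===== B-side lemmas =====

-- lexicographic order on (n % k, n), the sort key of Source B
def pvLe (k a b : Int) : Prop := pvG k a < pvG k b ∨ (pvG k a = pvG k b ∧ a ≤ b)

theorem pvLe_rk {k a b : Int} (h : pvLe k a b) : pvG k a ≤ pvG k b := by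
  rcases h with h | ⟨h, _⟩ <;> omega

-- insertion into a pairwise-ordered list stays pairwise-ordered
theorem pv_pairwise_insertBy {α : Type} (bef : α → α → Bool) (le : α → α → Prop)
    (h1 : ∀ a b, bef a b = true → le a b) (h2 : ∀ a b, bef a b = false → le b a)
    (htr : ∀ a b c, le a b → le b c → le a c)
    (x : α) (l : List α) (hl : l.Pairwise le) :
    (PySem.List.insertBy bef x l).Pairwise le := by
  induction l with
  | nil => simp [PySem.List.insertBy]
  | cons y ys ih =>
    rcases List.pairwise_cons.1 hl with ⟨hy, hys⟩
    by_cases hb : bef x y = true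
    · have he : PySem.List.insertBy bef x (y :: ys) = x :: y :: ys := by
        simp [PySem.List.insertBy, hb]
      rw [he]
      refine List.pairwise_cons.2 ⟨?_, hl⟩
      intro z hz
      rcases List.mem_cons.1 hz with rfl | hz
      · exact h1 _ _ hb
      · exact htr _ _ _ (h1 _ _ hb) (hy z hz)
    · have hb' : bef x y = false := by simpa using hb
      have he : PySem.List.insertBy bef x (y :: ys) = y :: PySem.List.insertBy bef x ys := by
        simp [PySem.List.insertBy, hb']
      rw [he]
      refine List.pairwise_cons.2 ⟨?_, ih hys⟩
      intro z hz
      rcases (PySem.List.mem_insertBy bef x z ys).1 hz with rfl | hz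
      · exact h2 _ _ hb'
      · exact hy z hz

theorem pv_pairwise_foldl_insertBy {α : Type} (bef : α → α → Bool) (le : α → α → Prop)
    (h1 : ∀ a b, bef a b = true → le a b) (h2 : ∀ a b, bef a b = false → le b a)
    (htr : ∀ a b c, le a b → le b c → le a c)
    (xs : List α) (acc : List α) (hacc : acc.Pairwise le) :
    (xs.foldl (fun acc x => PySem.List.insertBy bef x acc) acc).Pairwise le := by
  induction xs generalizing acc with
  | nil => exact hacc
  | cons x t ih =>
    exact ih _ (pv_pairwise_insertBy bef le h1 h2 htr x acc hacc)

-- the sorted list Source B iterates over is pairwise pvLe-ordered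
theorem pvSorted_pairwise (nums : List Int) (k : Int) :
    (PySem.List.sorted2 nums (fun x => PySem.Int.mod x k) (fun x => x)).Pairwise (pvLe k) := by
  show (nums.foldl (fun acc x => PySem.List.insertBy
      (fun a b => decide (PySem.Int.mod a k < PySem.Int.mod b k) ||
        (!decide (PySem.Int.mod b k < PySem.Int.mod a k) && decide (a < b))) x acc) []).Pairwise (pvLe k)
  apply pv_pairwise_foldl_insertBy
  · intro a b h
    simp only [Bool.or_eq_true, Bool.and_eq_true, Bool.not_eq_eq_eq_not, Bool.not_true,
      decide_eq_true_eq, decide_eq_false_iff_not] at h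
    unfold pvLe pvG
    rcases h with h | ⟨h1, h2⟩
    · left; exact h
    · by_cases hc : PySem.Int.mod a k < PySem.Int.mod b k
      · left; exact hc
      · right; exact ⟨by omega, le_of_lt h2⟩
  · intro a b h
    have h' : ¬ (PySem.Int.mod a k < PySem.Int.mod b k ∨
        (¬ PySem.Int.mod b k < PySem.Int.mod a k ∧ a < b)) := by
      intro hc
      rcases hc with hc | ⟨hc1, hc2⟩
      · simp [hc] at h
      · simp [hc1, hc2] at h
    push_neg at h'
    obtain ⟨h1, h2⟩ := h'
    unfold pvLe pvG
    by_cases hc : PySem.Int.mod b k < PySem.Int.mod a k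
    · left; exact hc
    · have := h2 (by omega)
      right; omega
  · intro a b c hab hbc
    unfold pvLe at *
    rcases hab with h | ⟨h, h'⟩ <;> rcases hbc with g | ⟨g, g'⟩
    · left; omega
    · left; omega
    · left; omega
    · right; exact ⟨by omega, by omega⟩
  · exact List.Pairwise.nil

-- Source B's loop body and loop, named for the proofs
def pvRunStep (k : Int) (st : Int × Int × Int × Int × Option Int) (n : Int) :
    Int × Int × Int × Int × Option Int :=
  let r := PySem.Int.mod n k
  let (bl, bv, rl, rs, prev) := st
  let (rl, rs, prev) := if prev == some r then (rl, rs, prev) else ((0 : Int), n, some r)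
  let rl := rl + 1
  if rl > bl ∨ (rl = bl ∧ rs < bv) then (rl, rs, rl, rs, prev) else (bl, bv, rl, rs, prev)

def pvRun (k : Int) (p : List Int) : Int × Int × Int × Int × Option Int :=
  p.foldl (pvRunStep k) (0, 0, 0, 0, none)

theorem pvAlt_eq (nums : List Int) (k : Int) :
    destroyTargets_alt nums k =
      (pvRun k (PySem.List.sorted2 nums (fun x => PySem.Int.mod x k) (fun x => x))).2.1 := rfl

theorem pvRunStep_hit (k bl bv rl rs n : Int) (prev : Option Int)
    (h : (prev == some (PySem.Int.mod n k)) = true) :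
    pvRunStep k (bl, bv, rl, rs, prev) n =
      if rl + 1 > bl ∨ (rl + 1 = bl ∧ rs < bv) then (rl + 1, rs, rl + 1, rs, prev)
      else (bl, bv, rl + 1, rs, prev) := by
  simp [pvRunStep, h]

theorem pvRunStep_miss (k bl bv rl rs n : Int) (prev : Option Int)
    (h : (prev == some (PySem.Int.mod n k)) = false) :
    pvRunStep k (bl, bv, rl, rs, prev) n =
      if (1 : Int) > bl ∨ ((1 : Int) = bl ∧ n < bv) then (1, n, 1, n, some (PySem.Int.mod n k))
      else (bl, bv, 1, n, some (PySem.Int.mod n k)) := by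
  simp [pvRunStep, h]

-- the run-scan invariant: over a pvLe-pairwise list q ++ [n], the state holds the trailing
-- run's data (= the group of n's remainder) and the best (count, min-start) over all groups
theorem pvRun_inv (k : Int) (q : List Int) (n : Int)
    (hpw : (q ++ [n]).Pairwise (pvLe k)) :
    (pvRun k (q ++ [n])).2.2.2.2 = some (pvG k n) ∧
    (pvRun k (q ++ [n])).2.2.1 = pvCnt (q ++ [n]) k (pvG k n) ∧
    (pvRun k (q ++ [n])).2.2.2.1 = pvMn (q ++ [n]) k (pvG k n) ∧
    (pvRun k (q ++ [n])).2.1 ∈ q ++ [n] ∧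
    pvCnt (q ++ [n]) k (pvG k (pvRun k (q ++ [n])).2.1) = (pvRun k (q ++ [n])).1 ∧
    (∀ y ∈ q ++ [n], pvCnt (q ++ [n]) k (pvG k y) ≤ (pvRun k (q ++ [n])).1) ∧
    (∀ y ∈ q ++ [n], pvCnt (q ++ [n]) k (pvG k y) = (pvRun k (q ++ [n])).1 →
      (pvRun k (q ++ [n])).2.1 ≤ y) := by
  induction q using List.reverseRecOn generalizing n with
  | nil =>
    have hc : pvRun k ([] ++ [n]) = (1, n, 1, n, some (pvG k n)) := by
      have h0 : pvRun k ([] ++ [n]) = pvRunStep k (0, 0, 0, 0, none) n := by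
        simp [pvRun]
      rw [h0, pvRunStep_miss k 0 0 0 0 n none rfl]
      norm_num
      rfl
    have hg1 : pvGrp [n] k (pvG k n) = [n] := by simp [pvGrp]
    rw [hc]
    refine ⟨rfl, ?_, ?_, ?_, ?_, ?_, ?_⟩
    · simp [pvCnt, hg1]
    · simp [pvMn, hg1]
    · simp
    · simp [pvCnt, hg1]
    · intro y hy
      simp only [List.nil_append, List.mem_singleton] at hy
      subst hy
      simp [pvCnt, hg1]
    · intro y hy _
      simp only [List.nil_append, List.mem_singleton] at hy
      subst hy
      exact le_rfl
  | append_singleton q' m ih =>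
    -- P = q' ++ [m] is the already-processed prefix
    have hpwP : (q' ++ [m]).Pairwise (pvLe k) :=
      hpw.sublist (List.sublist_append_left _ _)
    have hallP : ∀ y ∈ q' ++ [m], pvLe k y n := by
      intro y hy
      exact (List.pairwise_append.1 hpw).2.2 y hy n (List.mem_singleton_self n)
    have hm_in : m ∈ q' ++ [m] := List.mem_append_right _ (List.mem_singleton_self m)
    obtain ⟨hprev, hrl, hrs, hbvm, hbvc, hmax, htie⟩ := ih m hpwP
    have hstep : pvRun k (q' ++ [m] ++ [n]) = pvRunStep k (pvRun k (q' ++ [m])) n := by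
      simp [pvRun, List.foldl_append]
    rcases hst : pvRun k (q' ++ [m]) with ⟨bl, bv, rl, rs, prev⟩
    rw [hst] at hprev hrl hrs hbvm hbvc hmax htie hstep
    simp only at hprev hrl hrs hbvm hbvc hmax htie
    subst hprev
    have hmgrp : m ∈ pvGrp (q' ++ [m]) k (pvG k m) := pv_grp_mem hm_in rfl
    have hgne : pvGrp (q' ++ [m]) k (pvG k m) ≠ [] := List.ne_nil_of_mem hmgrp
    by_cases hc : pvG k n = pvG k m
    · -- n continues the current run: same remainder as m
      have hbeq : ((some (pvG k m) : Option Int) == some (PySem.Int.mod n k)) = true := by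
        have : PySem.Int.mod n k = pvG k m := hc
        simp [this]
      rw [hstep, pvRunStep_hit k bl bv rl rs n _ hbeq]
      have hm_le_n : m ≤ n := by
        rcases hallP m hm_in with h | ⟨_, h⟩
        · unfold pvG at h hc; omega
        · exact h
      have hmn_le : pvMn (q' ++ [m]) k (pvG k m) ≤ m := pv_mn_le hmgrp
      have hmn' : pvMn (q' ++ [m] ++ [n]) k (pvG k m) = pvMn (q' ++ [m]) k (pvG k m) := by
        rw [pvMn_append_eq _ n k _ hc hgne]
        exact min_eq_left (le_trans hmn_le hm_le_n)
      have hcnt' : pvCnt (q' ++ [m] ++ [n]) k (pvG k m) = rl + 1 := by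
        rw [pvCnt_append_eq _ n k _ hc, ← hrl]
      have hcnt_ne : ∀ j, j ≠ pvG k m → pvCnt (q' ++ [m] ++ [n]) k j = pvCnt (q' ++ [m]) k j := by
        intro j hj
        exact pvCnt_append_ne _ n k j (fun hh => hj (hh ▸ hc))
      have hrs_grp := pv_mem_grp (pv_mn_mem hgne)
      by_cases hcond : rl + 1 > bl ∨ (rl + 1 = bl ∧ rs < bv)
      · rw [if_pos hcond]
        dsimp only
        have hble : bl ≤ rl + 1 := by rcases hcond with h | ⟨h, _⟩ <;> omega
        refine ⟨by rw [hc], ?_, ?_, ?_, ?_, ?_, ?_⟩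
        · rw [hc, hcnt']
        · rw [hc, hmn', ← hrs]
        · show rs ∈ q' ++ [m] ++ [n]
          rw [hrs]
          exact List.mem_append_left _ hrs_grp.1
        · have : pvG k rs = pvG k m := hrs ▸ hrs_grp.2
          rw [this, hcnt']
        · intro y hy
          rcases List.mem_append.1 hy with hyP | hyn
          · by_cases hj : pvG k y = pvG k m
            · rw [hj, hcnt']
            · rw [hcnt_ne _ hj]
              have := hmax y hyP
              omega
          · simp only [List.mem_singleton] at hyn
            subst hyn
            rw [hc, hcnt']
        · intro y hy hcy
          by_cases hj : pvG k y = pvG k m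
          · have hyg : y ∈ pvGrp (q' ++ [m] ++ [n]) k (pvG k m) := pv_grp_mem hy hj
            have := pv_mn_le hyg
            rw [hmn', ← hrs] at this
            exact this
          · have hyP : y ∈ q' ++ [m] := by
              rcases List.mem_append.1 hy with h | h
              · exact h
              · simp only [List.mem_singleton] at h; subst h; exact absurd hc hj
            rw [hcnt_ne _ hj] at hcy
            have hub := hmax y hyP
            rcases hcond with h | ⟨h, h'⟩
            · omega
            · have := htie y hyP (by omega)
              omega
      · rw [if_neg hcond]
        dsimp only
        push_neg at hcond
        obtain ⟨hle1, hle2⟩ := hcond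
        refine ⟨by rw [hc], ?_, ?_, ?_, ?_, ?_, ?_⟩
        · rw [hc, hcnt']
        · rw [hc, hmn', ← hrs]
        · exact List.mem_append_left _ hbvm
        · by_cases hj : pvG k bv = pvG k m
          · exfalso
            rw [hj, ← hrl] at hbvc
            omega
          · rw [hcnt_ne _ hj]; exact hbvc
        · intro y hy
          rcases List.mem_append.1 hy with hyP | hyn
          · by_cases hj : pvG k y = pvG k m
            · rw [hj, hcnt']; omega
            · rw [hcnt_ne _ hj]
              exact hmax y hyP
          · simp only [List.mem_singleton] at hyn
            subst hyn
            rw [hc, hcnt']; omega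
        · intro y hy hcy
          by_cases hj : pvG k y = pvG k m
          · rw [hj, hcnt'] at hcy
            have hbvrs := hle2 hcy
            have hyg : y ∈ pvGrp (q' ++ [m] ++ [n]) k (pvG k m) := pv_grp_mem hy hj
            have := pv_mn_le hyg
            rw [hmn', ← hrs] at this
            omega
          · have hyP : y ∈ q' ++ [m] := by
              rcases List.mem_append.1 hy with h | h
              · exact h
              · simp only [List.mem_singleton] at h; subst h; exact absurd hc hj
            rw [hcnt_ne _ hj] at hcy
            exact htie y hyP hcy
    · -- n starts a fresh run: its remainder occurs nowhere in q' ++ [m]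
      have hbeq : ((some (pvG k m) : Option Int) == some (PySem.Int.mod n k)) = false := by
        have : PySem.Int.mod n k = pvG k n := rfl
        rw [this]
        simp
        exact fun hh => hc hh.symm
      rw [hstep, pvRunStep_miss k bl bv rl rs n _ hbeq]
      have hrk_all : ∀ y ∈ q' ++ [m], pvG k y ≠ pvG k n := by
        intro y hy heq
        rcases List.mem_append.1 hy with hyq | hym
        · have h1 := pvLe_rk ((List.pairwise_append.1 hpwP).2.2 y hyq m (List.mem_singleton_self m))
          have h2 := pvLe_rk (hallP m hm_in)
          exact hc (by omega)
        · simp only [List.mem_singleton] at hym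
          subst hym
          exact hc heq.symm
      have hfresh : pvGrp (q' ++ [m]) k (pvG k n) = [] := by
        rw [List.eq_nil_iff_forall_not_mem]
        intro z hz
        obtain ⟨hz1, hz2⟩ := pv_mem_grp hz
        exact hrk_all z hz1 hz2
      have hcnt1 : pvCnt (q' ++ [m] ++ [n]) k (pvG k n) = 1 := by
        rw [pvCnt_append_eq _ n k _ rfl]
        simp [pvCnt, hfresh]
      have hmn1 : pvMn (q' ++ [m] ++ [n]) k (pvG k n) = n :=
        pvMn_append_fresh _ n k _ rfl hfresh
      have hcnt_ne : ∀ j, j ≠ pvG k n → pvCnt (q' ++ [m] ++ [n]) k j = pvCnt (q' ++ [m]) k j := by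
        intro j hj
        exact pvCnt_append_ne _ n k j (fun hh => hj hh.symm)
      have hbl1 : 1 ≤ bl := by
        have hbvg : bv ∈ pvGrp (q' ++ [m]) k (pvG k bv) := pv_grp_mem hbvm rfl
        have := pv_cnt_pos (List.ne_nil_of_mem hbvg)
        omega
      have hsome : (some (PySem.Int.mod n k) : Option Int) = some (pvG k n) := rfl
      by_cases hcond : (1 : Int) > bl ∨ ((1 : Int) = bl ∧ n < bv)
      · rw [if_pos hcond]
        dsimp only
        have hblv : bl = 1 ∧ n < bv := by
          rcases hcond with h | ⟨h, h'⟩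
          · omega
          · exact ⟨h.symm, h'⟩
        refine ⟨hsome, hcnt1.symm ▸ rfl, ?_, ?_, ?_, ?_, ?_⟩
        · rw [hmn1]
        · exact List.mem_append_right _ (List.mem_singleton_self n)
        · rw [hcnt1]
        · intro y hy
          rcases List.mem_append.1 hy with hyP | hyn
          · rw [hcnt_ne _ (hrk_all y hyP)]
            have := hmax y hyP
            omega
          · simp only [List.mem_singleton] at hyn
            subst hyn
            rw [hcnt1]
        · intro y hy hcy
          rcases List.mem_append.1 hy with hyP | hyn
          · rw [hcnt_ne _ (hrk_all y hyP)] at hcy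
            have := htie y hyP (by omega)
            omega
          · simp only [List.mem_singleton] at hyn
            subst hyn
            exact le_rfl
      · rw [if_neg hcond]
        dsimp only
        push_neg at hcond
        obtain ⟨hg1, hg2⟩ := hcond
        refine ⟨hsome, ?_, ?_, ?_, ?_, ?_, ?_⟩
        · rw [hcnt1]
        · rw [hmn1]
        · exact List.mem_append_left _ hbvm
        · rw [hcnt_ne _ (hrk_all bv hbvm)]
          exact hbvc
        · intro y hy
          rcases List.mem_append.1 hy with hyP | hyn
          · rw [hcnt_ne _ (hrk_all y hyP)]
            exact hmax y hyP
          · simp only [List.mem_singleton] at hyn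
            subst hyn
            rw [hcnt1]
            omega
        · intro y hy hcy
          rcases List.mem_append.1 hy with hyP | hyn
          · rw [hcnt_ne _ (hrk_all y hyP)] at hcy
            exact htie y hyP hcy
          · simp only [List.mem_singleton] at hyn
            subst hyn
            rw [hcnt1] at hcy
            exact hg2 hcy

-- perm transfer: counts and membership are permutation-invariant
theorem pvCnt_perm {s t : List Int} (hp : s.Perm t) (k r : Int) :
    pvCnt s k r = pvCnt t k r := by
  simp only [pvCnt, pvGrp]
  rw [(hp.filter _).length_eq]

-- ===== main proof =====
theorem destroyTargets_eq (nums : List Int) (k : Int) (hne : nums ≠ []) :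
    destroyTargets nums k = destroyTargets_alt nums k := by
  -- A's result: an element of a maximum-count remainder group, minimal among all such
  set rs := nums.map (pvG k) with hrs
  have hkeys : (pvDic nums k).keys = PySem.Set.ofList rs := pvDic_keys nums k
  have hmemkeys : ∀ r, r ∈ (pvDic nums k).keys ↔ r ∈ rs := by
    intro r; rw [hkeys]; exact PySem.Set.mem_ofList rs r
  have hgetD : ∀ r ∈ (pvDic nums k).keys,
      (pvDic nums k).getD r ((0 : Int), (0 : Int)) = (pvCnt nums k r, pvMn nums k r) := by
    intro r hr
    have hg : pvGrp nums k r ≠ [] := pv_grp_ne_nil ((hmemkeys r).1 hr)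
    have hq := pvDic_get? nums k r
    rw [if_neg hg] at hq
    exact PySem.Dict.getD_of_get?_eq_some _ _ hq
  set L := (pvDic nums k).keys.map (fun r => (pvCnt nums k r, pvMn nums k r)) with hL
  set res := L.foldl pvStep ((0 : Int), (0 : Int)) with hres
  have hA : destroyTargets nums k = res.2 := by
    have hmap : (pvDic nums k).keys.map (fun i => (pvDic nums k).getD i ((0 : Int), (0 : Int))) =
        (pvDic nums k).keys.map (fun r => (pvCnt nums k r, pvMn nums k r)) :=
      List.map_congr_left (fun r hr => hgetD r hr)
    rw [pvA_eq, hres, hL, ← List.foldl_map, hmap]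
  obtain ⟨n0, hn0⟩ : ∃ n0, n0 ∈ nums := by
    cases nums with
    | nil => exact absurd rfl hne
    | cons a t => exact ⟨a, List.mem_cons_self ..⟩
  have hr0 : pvG k n0 ∈ rs := List.mem_map_of_mem hn0
  obtain ⟨r0, kt, hkcons⟩ : ∃ r0 kt, (pvDic nums k).keys = r0 :: kt := by
    cases hk : (pvDic nums k).keys with
    | nil =>
      exfalso
      have hx := (hmemkeys (pvG k n0)).2 hr0
      rw [hk] at hx; simp at hx
    | cons a b => exact ⟨a, b, rfl⟩
  have hcnt_pos : ∀ r ∈ (pvDic nums k).keys, 1 ≤ pvCnt nums k r := by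
    intro r hr
    exact pv_cnt_pos (pv_grp_ne_nil ((hmemkeys r).1 hr))
  have hr0mem : r0 ∈ (pvDic nums k).keys := by rw [hkcons]; exact List.mem_cons_self ..
  have hres1_pos : 1 ≤ res.1 := by
    have hmemL : (pvCnt nums k r0, pvMn nums k r0) ∈ L := by
      rw [hL]; exact List.mem_map_of_mem hr0mem
    have h1 : (1 : Int) ≤ pvCnt nums k r0 := hcnt_pos r0 hr0mem
    have hfst := pv_fst L ((0 : Int), (0 : Int))
    have hle := (PySem.List.le_foldl_max_int L Prod.fst 0).2 _ hmemL
    rw [hres, hfst]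
    simp only at hle ⊢
    omega
  have hAmem : destroyTargets nums k ∈ nums ∧
      pvCnt nums k (pvG k (destroyTargets nums k)) = res.1 := by
    obtain ⟨p, hpL, hp1, hp2⟩ := pv_attain L ((0 : Int), (0 : Int)) (by simpa using hres1_pos)
    rw [← hres] at hp1 hp2
    rw [hL] at hpL
    obtain ⟨r, hr, hpr⟩ := List.mem_map.1 hpL
    have hpr' : (pvCnt nums k r, pvMn nums k r) = p := hpr
    have hg : pvGrp nums k r ≠ [] := pv_grp_ne_nil ((hmemkeys r).1 hr)
    obtain ⟨hmn_nums, hmn_g⟩ := pv_mem_grp (pv_mn_mem hg)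
    have hcntr : pvCnt nums k r = res.1 := by rw [← hpr'] at hp1; exact hp1
    have hvalA : destroyTargets nums k = pvMn nums k r := by
      calc destroyTargets nums k = res.2 := hA
        _ = p.2 := hp2
        _ = pvMn nums k r := by rw [← hpr']
    exact ⟨by rw [hvalA]; exact hmn_nums, by rw [hvalA, hmn_g]; exact hcntr⟩
  have hAle : ∀ y ∈ nums, pvCnt nums k (pvG k y) = res.1 → destroyTargets nums k ≤ y := by
    intro y hy hcy
    have hrk : pvG k y ∈ (pvDic nums k).keys := (hmemkeys _).2 (List.mem_map_of_mem hy)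
    have hpL : (pvCnt nums k (pvG k y), pvMn nums k (pvG k y)) ∈ L := by
      rw [hL]; exact List.mem_map_of_mem hrk
    have hle := pv_min L ((0 : Int), (0 : Int)) _ hpL (by rw [← hres]; exact hcy)
    have hyg : y ∈ pvGrp nums k (pvG k y) := pv_grp_mem hy rfl
    calc destroyTargets nums k = res.2 := hA
      _ ≤ pvMn nums k (pvG k y) := by rw [hres]; exact hle
      _ ≤ y := pv_mn_le hyg
  have hAmax : ∀ y ∈ nums, pvCnt nums k (pvG k y) ≤ res.1 := by
    intro y hy
    have hrk : pvG k y ∈ (pvDic nums k).keys := (hmemkeys _).2 (List.mem_map_of_mem hy)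
    have hpL : (pvCnt nums k (pvG k y), pvMn nums k (pvG k y)) ∈ L := by
      rw [hL]; exact List.mem_map_of_mem hrk
    have hle := (PySem.List.le_foldl_max_int L Prod.fst 0).2 _ hpL
    have hfst := pv_fst L ((0 : Int), (0 : Int))
    rw [hres, hfst]
    simpa using hle
  -- B's result, via the run-scan invariant and the sorted permutation
  set sl := PySem.List.sorted2 nums (fun x => PySem.Int.mod x k) (fun x => x) with hsl
  have hperm : sl.Perm nums := PySem.List.sorted2_perm nums _ _ _
  have hpw : sl.Pairwise (pvLe k) := pvSorted_pairwise nums k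
  have hslne : sl ≠ [] := by
    intro h0
    apply hne
    have := hperm.length_eq
    rw [h0] at this
    exact List.length_eq_zero_iff.1 this.symm
  obtain ⟨q, x, hqx⟩ : ∃ q x, sl = q ++ [x] := by
    rcases List.eq_nil_or_concat sl with h | ⟨q, x, h⟩
    · exact absurd h hslne
    · exact ⟨q, x, by simpa [List.concat_eq_append] using h⟩
  have hinv := pvRun_inv k q x (hqx ▸ hpw)
  rw [← hqx] at hinv
  obtain ⟨_, _, _, hBmem, hBcnt, hBmax, hBtie⟩ := hinv
  have hcntT : ∀ r, pvCnt sl k r = pvCnt nums k r := fun r => pvCnt_perm hperm k r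
  have hBmem' : (pvRun k sl).2.1 ∈ nums := hperm.mem_iff.1 hBmem
  have hBcnt' : pvCnt nums k (pvG k (pvRun k sl).2.1) = (pvRun k sl).1 := by
    rw [← hcntT]; exact hBcnt
  have hBmax' : ∀ y ∈ nums, pvCnt nums k (pvG k y) ≤ (pvRun k sl).1 := by
    intro y hy; rw [← hcntT]; exact hBmax y (hperm.mem_iff.2 hy)
  have hBtie' : ∀ y ∈ nums, pvCnt nums k (pvG k y) = (pvRun k sl).1 → (pvRun k sl).2.1 ≤ y := by
    intro y hy hcy
    exact hBtie y (hperm.mem_iff.2 hy) (by rw [hcntT]; exact hcy)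
  have hBval : destroyTargets_alt nums k = (pvRun k sl).2.1 := pvAlt_eq nums k
  -- both are the minimum of the (same) maximum-count groups
  have heq : (pvRun k sl).1 = res.1 := by
    have h1 : (pvRun k sl).1 ≤ res.1 := hBcnt' ▸ hAmax _ hBmem'
    have h2 : res.1 ≤ (pvRun k sl).1 := hAmem.2 ▸ hBmax' _ hAmem.1
    omega
  have h1 : destroyTargets nums k ≤ (pvRun k sl).2.1 :=
    hAle _ hBmem' (by rw [hBcnt', heq])
  have h2 : (pvRun k sl).2.1 ≤ destroyTargets nums k :=
    hBtie' _ hAmem.1 (by rw [hAmem.2, heq])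
  rw [hBval]
  omega

-- ===== VERDICT (by name: the statement is the Claim_ definition above) =====
theorem destroyTargets_spec : Claim_equal_destroyTargets := by
  intro nums k _ hpre
  unfold Spec_destroyTargets
  exact destroyTargets_eq nums k hpre.1
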